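-- pv_equiv track=rewrite | github.com/Alireza2317/Project_Euler | 35/35.py | get_circulations
-- ===== SOURCE A (Python) =====
-- def get_circulations(number: int) -> list[int]:
-- 	circs: list[int] = []
--
-- 	number_s: str = str(number)
-- 	num_digits = len(number_s)
--
-- 	for _ in range(num_digits):
-- 		number_s = number_s[-1] + number_s[:-1]
-- 		circs.append(int(number_s))
--
-- 	return circs
-- ===== SOURCE B (Python) =====
-- def get_circulations(number: int) -> list[int]:
-- 	number_s = str(number)
-- 	n = len(number_s)
-- 	doubled = number_s + number_s
-- 	return [int(doubled[n - k : 2 * n - k]) for k in range(1, n + 1)]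
-- ===== Notes on version B (the rewrite author's own statement) =====
-- stated objective: alternative
-- what changed: B replaces A's loop that mutates a running string (re-rotating it each step) by precomputing the doubled string once and reading each rotation as a sliding width-n window slice.
import Mathlib
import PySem

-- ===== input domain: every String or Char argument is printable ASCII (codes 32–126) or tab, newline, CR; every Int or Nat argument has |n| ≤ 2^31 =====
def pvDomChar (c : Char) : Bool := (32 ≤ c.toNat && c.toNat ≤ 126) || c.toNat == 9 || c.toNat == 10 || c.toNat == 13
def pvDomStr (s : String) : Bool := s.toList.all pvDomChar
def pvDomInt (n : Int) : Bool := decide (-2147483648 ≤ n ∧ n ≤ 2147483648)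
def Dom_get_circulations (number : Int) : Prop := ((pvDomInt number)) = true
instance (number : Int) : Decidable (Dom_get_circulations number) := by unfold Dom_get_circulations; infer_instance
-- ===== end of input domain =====

-- B reads each rotation as a window of the doubled digit string instead of mutating a running string; return values agree on all non-negative inputs (alternative decomposition, same cost).
-- ===== PORT A =====
-- number_s[-1] + number_s[:-1] : the rotation step on the char list (pyGet? none case unreachable, str(n) nonempty)
def pvRotA (s : List Char) : List Char :=
  (match PySem.List.pyGet? s (-1) with | some c => [c] | none => []) ++
    PySem.List.slice s none (some (-1))

def get_circulations (number : Int) : List Int :=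
  let number_s := PySem.Int.toChars number
  let num_digits := number_s.length
  ((List.range num_digits).foldl
    (fun (st : List Int × List Char) _ =>
      let s' := pvRotA st.2
      (st.1 ++ [(PySem.Int.ofChars? s').getD 0], s'))
    ([], number_s)).1

-- ===== PORT B =====
def get_circulations_alt (number : Int) : List Int :=
  let number_s := PySem.Int.toChars number
  let n : Int := number_s.length
  let doubled := number_s ++ number_s
  (PySem.List.pyRange 1 (n + 1) 1).map (fun k =>
    (PySem.Int.ofChars? (PySem.List.slice doubled (some (n - k)) (some (2 * n - k)))).getD 0)

-- ===== PRECONDITION & SPEC =====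
-- Pre_ excludes negative numbers, on which Python's int() raises ValueError in both A and B.
def Pre_get_circulations (number : Int) : Prop := 0 <= number
instance (number : Int) : Decidable (Pre_get_circulations number) := by unfold Pre_get_circulations; infer_instance
def pvWitness_get_circulations : Int := (197)
def Spec_get_circulations (number : Int) (out : List Int) : Prop := out = get_circulations_alt number
instance (number : Int) (out : List Int) : Decidable (Spec_get_circulations number out) := by unfold Spec_get_circulations; infer_instance

-- ===== CLAIM (what is proved, stated in full; the proofs are below) =====
def Claim_equal_get_circulations : Prop := ∀ (number : Int), Dom_get_circulations number → Pre_get_circulations number → Spec_get_circulations number (get_circulations number)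

-- ===== LEMMAS AND PROOFS =====

-- the k-th right rotation of s
def pvRotk (s : List Char) (k : Nat) : List Char := s.drop (s.length - k) ++ s.take (s.length - k)

theorem pvRotA_eq (t : List Char) : pvRotA t = t.drop (t.length - 1) ++ t.take (t.length - 1) := by
  cases t with
  | nil => decide
  | cons a as =>
    unfold pvRotA
    rw [PySem.List.pyGet?_neg_one, PySem.List.slice_to_neg_one,
        List.drop_eq_getElem_cons (by simp), List.dropLast_eq_take]
    simp [List.getLast?_eq_getElem?]
    rfl

theorem pvRotA_rotk (s : List Char) (k : Nat) (hk : k < s.length) :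
    pvRotA (pvRotk s k) = pvRotk s (k + 1) := by
  rw [pvRotA_eq]
  unfold pvRotk
  set j := s.length - k with hj
  have hj1 : 1 ≤ j := by omega
  have hjl : j ≤ s.length := by omega
  have hlen : (s.drop j ++ s.take j).length = s.length := by
    simp only [List.length_append, List.length_drop, List.length_take]; omega
  have htake : s.take j = s.take (j-1) ++ [s[j-1]] := by
    have := List.take_add_one (l := s) (i := j-1)
    rw [Nat.sub_add_cancel hj1] at this
    simp [this, List.getElem?_eq_getElem (by omega : j-1 < s.length)]
  have hL : (s.drop j ++ s.take (j-1)).length = s.length - 1 := by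
    simp only [List.length_append, List.length_drop, List.length_take]; omega
  have hdropl : s.drop (j-1) = s[j-1] :: s.drop j := by
    rw [List.drop_eq_getElem_cons (by omega)]
    have h2 : j - 1 + 1 = j := by omega
    rw [h2]
  calc (s.drop j ++ s.take j).drop ((s.drop j ++ s.take j).length - 1)
        ++ (s.drop j ++ s.take j).take ((s.drop j ++ s.take j).length - 1)
      = ((s.drop j ++ s.take (j-1)) ++ [s[j-1]]).drop (s.length - 1)
        ++ ((s.drop j ++ s.take (j-1)) ++ [s[j-1]]).take (s.length - 1) := by
        rw [hlen, htake, List.append_assoc]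
    _ = [s[j-1]] ++ (s.drop j ++ s.take (j-1)) := by
        rw [List.drop_left' hL, List.take_left' hL]
    _ = s.drop (s.length - (k+1)) ++ s.take (s.length - (k+1)) := by
        have h3 : s.length - (k+1) = j - 1 := by omega
        rw [h3, hdropl]; simp

theorem pvLoopA (s : List Char) (k : Nat) (hk : k ≤ s.length) :
    (List.range k).foldl
      (fun (st : List Int × List Char) _ =>
        let s' := pvRotA st.2
        (st.1 ++ [(PySem.Int.ofChars? s').getD 0], s'))
      ([], s) =
    ((List.range k).map (fun i => (PySem.Int.ofChars? (pvRotk s (i + 1))).getD 0), pvRotk s k) := by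
  induction k with
  | zero => simp [pvRotk]
  | succ m ih =>
    rw [List.range_succ, List.foldl_append, List.map_append, ih (by omega)]
    simp only [List.foldl_cons, List.foldl_nil, List.map_cons, List.map_nil]
    rw [pvRotA_rotk s m (by omega)]

theorem pvSliceB (s : List Char) (k : Nat) (hk1 : 1 ≤ k) (hk : k ≤ s.length) :
    PySem.List.slice (s ++ s) (some ((s.length : Int) - k)) (some (2 * (s.length : Int) - k)) =
      pvRotk s k := by
  rw [PySem.List.slice_toNat (s ++ s) (by omega) (by omega)]
  have h1 : ((s.length : Int) - k).toNat = s.length - k := by omega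
  have h2 : (2 * (s.length : Int) - k).toNat - (s.length - k) = s.length := by omega
  rw [h1, h2, List.drop_append]
  have h3 : s.length - k - s.length = 0 := by omega
  rw [h3, List.drop_zero, List.take_append]
  have h4 : (s.drop (s.length - k)).length = k := by simp; omega
  rw [List.take_of_length_le (by omega), h4]
  rfl

-- ===== VERDICT (by name: the statement is the Claim_ definition above) =====
theorem get_circulations_spec : Claim_equal_get_circulations := by
  intro number _ _
  unfold Spec_get_circulations get_circulations get_circulations_alt
  simp only
  set s := PySem.Int.toChars number with hs
  rw [pvLoopA s s.length le_rfl]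
  rw [PySem.List.pyRange_one]
  have hn : ((s.length : Int) + 1 - 1).toNat = s.length := by omega
  rw [hn, List.map_map]
  apply List.map_congr_left
  intro i hi
  simp only [List.mem_range] at hi
  simp only [Function.comp]
  have hk : (s.length : Int) - (1 + (i : Int)) = (s.length : Int) - ((i + 1 : Nat) : Int) := by push_cast; ring
  have hk2 : 2 * (s.length : Int) - (1 + (i : Int)) = 2 * (s.length : Int) - ((i + 1 : Nat) : Int) := by push_cast; ring
  rw [hk, hk2, pvSliceB s (i + 1) (by omega) (by omega)]
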